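-- pv_equiv track=rewrite | github.com/TheBigKahuna353/School-Stuff | Cosc260/assignment_2.py | highlight_line
-- ===== SOURCE A (Python) =====
-- def lcs(s1, s2):
--     """lcs(s1, s2) -> longest common subsequence of s1 and s2"""
--     table = [[0 for i in range(len(s2)+1)] for j in range(len(s1)+1)]
--     for i in range(len(s1)+1):
--         for j in range(len(s2)+1):
--             if i == 0 or j == 0:
--                 table[i][j] = 0
--             elif s1[i-1] == s2[j-1]:
--                 table[i][j] = table[i-1][j-1] + 1
--             else:
--                 table[i][j] = max(table[i-1][j], table[i][j-1])
--
--     best = ""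
--     i, j = len(s1), len(s2)
--     while i > 0 and j > 0:
--         if s1[i-1] == s2[j-1]:
--             best = s1[i-1] + best
--             i -= 1
--             j -= 1
--         elif table[i-1][j] > table[i][j-1]:
--             i -= 1
--         else:
--             j -= 1
--     return best
--
-- def highlight_line(s1, s2):
--     """highlight_line(s1, s2) -> shows differences in lines"""
--     extras = lcs(s1, s2)
--     result1 = ""
--     for i in range(len(s1)):
--         if s1[i] in extras:
--             result1 += s1[i]
--         else:
--             result1 += "[[%s]]" % s1[i]
--     result2 = ""
--     for i in range(len(s2)):
--         if s2[i] in extras: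
--             result2 += s2[i]
--         else:
--             result2 += "[[%s]]" % s2[i]
--     return result1, result2
-- ===== SOURCE B (Python) =====
-- def highlight_line(s1, s2):
--     """highlight_line(s1, s2) -> shows differences in lines"""
--     # Forward string-valued DP: prev[j] is the chosen LCS of s1[:i] and s2[:j].
--     prev = [""] * (len(s2) + 1)
--     for c1 in s1:
--         cur = [""]
--         for j, c2 in enumerate(s2):
--             if c1 == c2:
--                 cur.append(prev[j] + c1)
--             elif len(prev[j + 1]) > len(cur[j]):
--                 cur.append(prev[j + 1])
--             else:
--                 cur.append(cur[j])
--         prev = cur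
--     extras = prev[-1]
--     r1 = "".join(c if c in extras else "[[%s]]" % c for c in s1)
--     r2 = "".join(c if c in extras else "[[%s]]" % c for c in s2)
--     return r1, r2
-- ===== Notes on version B (the rewrite author's own statement) =====
-- stated objective: alternative
-- what changed: Replaces the int table plus backward traceback with a single forward string-valued DP (rows of LCS strings, ties broken exactly as the traceback), and builds the highlighted lines with join over a comprehension.
import Mathlib
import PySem

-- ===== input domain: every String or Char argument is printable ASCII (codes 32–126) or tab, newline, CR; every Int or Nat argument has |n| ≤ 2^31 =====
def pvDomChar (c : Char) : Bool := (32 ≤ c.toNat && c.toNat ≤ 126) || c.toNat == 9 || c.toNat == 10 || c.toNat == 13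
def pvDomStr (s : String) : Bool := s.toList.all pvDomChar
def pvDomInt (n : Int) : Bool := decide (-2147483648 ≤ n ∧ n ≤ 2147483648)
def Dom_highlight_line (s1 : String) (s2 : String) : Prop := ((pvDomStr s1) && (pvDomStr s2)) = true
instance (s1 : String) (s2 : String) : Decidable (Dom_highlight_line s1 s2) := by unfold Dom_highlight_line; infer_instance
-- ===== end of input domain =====

-- B replaces A's int table + backward traceback with one forward string-valued DP (alternative decomposition).

-- ===== PORT A =====
-- table[i][j] read / write (indices produced by range(), always in range in A)
def pvGet2 (t : List (List Int)) (i j : Nat) : Int := (t.getD i []).getD j 0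
def pvSet2 (t : List (List Int)) (i j : Nat) (v : Int) : List (List Int) :=
  t.set i ((t.getD i []).set j v)

-- the nested fill loops of lcs (s1[i-1], s2[j-1] are in range whenever read; getD default never used)
def pvFill (s1 s2 : List Char) : List (List Int) :=
  (List.range (s1.length + 1)).foldl (fun t i =>
    (List.range (s2.length + 1)).foldl (fun t j =>
      pvSet2 t i j
        (if i = 0 ∨ j = 0 then 0
         else if s1.getD (i - 1) ' ' = s2.getD (j - 1) ' ' then pvGet2 t (i - 1) (j - 1) + 1
         else max (pvGet2 t (i - 1) j) (pvGet2 t i (j - 1)))) t)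
    ((List.range (s1.length + 1)).map (fun _ => (List.range (s2.length + 1)).map (fun _ => (0 : Int))))

-- the traceback while loop (i, j stay ≥ 0, so Nat; best is the accumulator built by prepending)
def pvTrace (s1 s2 : List Char) (t : List (List Int)) : Nat → Nat → List Char → List Char
  | 0, _, best => best
  | _ + 1, 0, best => best
  | i + 1, j + 1, best =>
    if s1.getD i ' ' = s2.getD j ' ' then pvTrace s1 s2 t i j (s1.getD i ' ' :: best)
    else if pvGet2 t i (j + 1) > pvGet2 t (i + 1) j then pvTrace s1 s2 t i (j + 1) best
    else pvTrace s1 s2 t (i + 1) j best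
termination_by i j _ => i + j

def pvLcsA (s1 s2 : List Char) : List Char :=
  pvTrace s1 s2 (pvFill s1 s2) s1.length s2.length []

def highlight_line (s1 : String) (s2 : String) : String × String :=
  let l1 := s1.toList
  let l2 := s2.toList
  let extras := pvLcsA l1 l2
  let r1 := (PySem.List.pyRange 0 (l1.length : Int) 1).foldl (fun acc i =>
    if PySem.Chars.isIn [PySem.List.pyGetD l1 i ' '] extras then acc ++ [PySem.List.pyGetD l1 i ' ']
    else acc ++ ('[' :: '[' :: PySem.List.pyGetD l1 i ' ' :: [']', ']'])) []
  let r2 := (PySem.List.pyRange 0 (l2.length : Int) 1).foldl (fun acc i =>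
    if PySem.Chars.isIn [PySem.List.pyGetD l2 i ' '] extras then acc ++ [PySem.List.pyGetD l2 i ' ']
    else acc ++ ('[' :: '[' :: PySem.List.pyGetD l2 i ' ' :: [']', ']'])) []
  (String.ofList r1, String.ofList r2)

-- ===== PORT B =====
-- inner loop of B: one DP row of LCS strings (cur is built by appending)
def pvRowB (s2 : List Char) (c1 : Char) (prev : List (List Char)) : List (List Char) :=
  (PySem.List.enumerate s2).foldl (fun cur p =>
    cur ++ [if c1 = p.2 then PySem.List.pyGetD prev p.1 [] ++ [c1]
            else if (PySem.List.pyGetD prev (p.1 + 1) []).length > (PySem.List.pyGetD cur p.1 []).length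
            then PySem.List.pyGetD prev (p.1 + 1) []
            else PySem.List.pyGetD cur p.1 []]) [[]]

def pvLcsB (s1 s2 : List Char) : List Char :=
  PySem.List.pyGetD (s1.foldl (fun prev c1 => pvRowB s2 c1 prev) (List.replicate (s2.length + 1) [])) (-1) []

def pvMark (extras : List Char) (c : Char) : List Char :=
  if PySem.Chars.isIn [c] extras then [c] else ('[' :: '[' :: c :: [']', ']'])

def highlight_line_alt (s1 : String) (s2 : String) : String × String :=
  let l1 := s1.toList
  let l2 := s2.toList
  let extras := pvLcsB l1 l2
  (String.ofList ((l1.map (pvMark extras)).flatten), String.ofList ((l2.map (pvMark extras)).flatten))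

-- ===== PRECONDITION & SPEC =====
def Spec_highlight_line (s1 : String) (s2 : String) (out : String × String) : Prop := out = highlight_line_alt s1 s2
instance (s1 : String) (s2 : String) (out : String × String) : Decidable (Spec_highlight_line s1 s2 out) := by unfold Spec_highlight_line; infer_instance

-- ===== CLAIM (what is proved, stated in full; the proofs are below) =====
def Claim_equal_highlight_line : Prop := ∀ (s1 : String) (s2 : String), Dom_highlight_line s1 s2 → Spec_highlight_line s1 s2 (highlight_line s1 s2)

-- ===== LEMMAS AND PROOFS =====

def pvL (s1 s2 : List Char) : Nat → Nat → List Char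
  | 0, _ => []
  | _ + 1, 0 => []
  | i + 1, j + 1 =>
    if s1.getD i ' ' = s2.getD j ' ' then pvL s1 s2 i j ++ [s1.getD i ' ']
    else if (pvL s1 s2 i (j + 1)).length > (pvL s1 s2 (i + 1) j).length then pvL s1 s2 i (j + 1)
    else pvL s1 s2 (i + 1) j
termination_by i j => i + j

theorem pvL_succ_succ (s1 s2 : List Char) (i j : Nat) :
    pvL s1 s2 (i + 1) (j + 1) =
      if s1.getD i ' ' = s2.getD j ' ' then pvL s1 s2 i j ++ [s1.getD i ' ']
      else if (pvL s1 s2 i (j + 1)).length > (pvL s1 s2 (i + 1) j).length then pvL s1 s2 i (j + 1)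
      else pvL s1 s2 (i + 1) j := by
  rw [pvL.eq_def]

theorem pvL_zero_left (s1 s2 : List Char) (j : Nat) : pvL s1 s2 0 j = [] := by
  rw [pvL.eq_def]

theorem pvL_zero_right (s1 s2 : List Char) (i : Nat) : pvL s1 s2 i 0 = [] := by
  cases i <;> rw [pvL.eq_def]

theorem getD_set {α : Type} (t : List α) (i k : Nat) (r d : α) :
    (t.set i r).getD k d = if k = i ∧ i < t.length then r else t.getD k d := by
  by_cases h1 : k = i
  · subst h1
    by_cases h2 : k < t.length <;> simp [List.getD, h2]
  · have h1' : i ≠ k := fun h => h1 h.symm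
    simp [List.getD, h1', h1]

theorem pvGet2_pvSet2 (t : List (List Int)) (i j v : _) (i' j' : Nat)
    (hj : j < (t.getD i []).length) :
    pvGet2 (pvSet2 t i j v) i' j' =
      if i' = i ∧ j' = j ∧ i < t.length then v else pvGet2 t i' j' := by
  unfold pvGet2 pvSet2
  rw [getD_set]
  by_cases h1 : i' = i
  · subst h1
    by_cases h2 : i' < t.length
    · rw [if_pos ⟨rfl, h2⟩, getD_set]
      by_cases h3 : j' = j
      · subst h3
        rw [if_pos ⟨rfl, hj⟩, if_pos ⟨rfl, rfl, h2⟩]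
      · rw [if_neg (by tauto), if_neg (by tauto)]
    · rw [if_neg (by tauto), if_neg (by tauto)]
  · rw [if_neg (by tauto), if_neg (by tauto)]

def InvRows (s1 s2 : List Char) (i : Nat) (t : List (List Int)) : Prop :=
  t.length = s1.length + 1 ∧
  (∀ r, r < s1.length + 1 → (t.getD r []).length = s2.length + 1) ∧
  (∀ i' j', i' < i → j' < s2.length + 1 → pvGet2 t i' j' = ((pvL s1 s2 i' j').length : Int))

def InvRow (s1 s2 : List Char) (i k : Nat) (t : List (List Int)) : Prop :=
  InvRows s1 s2 i t ∧ (∀ j', j' < k → pvGet2 t i j' = ((pvL s1 s2 i j').length : Int))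

theorem inner_step (s1 s2 : List Char) (i k : Nat) (hi : i ≤ s1.length) (hk : k ≤ s2.length)
    (t : List (List Int)) (h : InvRow s1 s2 i k t) :
    InvRow s1 s2 i (k + 1)
      (pvSet2 t i k
        (if i = 0 ∨ k = 0 then 0
         else if s1.getD (i - 1) ' ' = s2.getD (k - 1) ' ' then pvGet2 t (i - 1) (k - 1) + 1
         else max (pvGet2 t (i - 1) k) (pvGet2 t i (k - 1)))) := by
  obtain ⟨⟨hlen, hrow, hcells⟩, hrowi⟩ := h
  have hjr : k < (t.getD i []).length := by rw [hrow i (by omega)]; omega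
  have hval :
      (if i = 0 ∨ k = 0 then 0
       else if s1.getD (i - 1) ' ' = s2.getD (k - 1) ' ' then pvGet2 t (i - 1) (k - 1) + 1
       else max (pvGet2 t (i - 1) k) (pvGet2 t i (k - 1)))
      = ((pvL s1 s2 i k).length : Int) := by
    cases i with
    | zero => simp [pvL_zero_left]
    | succ i =>
      cases k with
      | zero => simp [pvL_zero_right]
      | succ k =>
        rw [if_neg (by omega : ¬((i + 1 = 0) ∨ (k + 1 = 0)))]
        simp only [Nat.add_sub_cancel]
        rw [hcells i k (by omega) (by omega), hcells i (k + 1) (by omega) (by omega),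
          hrowi k (by omega), pvL_succ_succ]
        by_cases hc : s1.getD i ' ' = s2.getD k ' '
        · rw [if_pos hc, if_pos hc]
          simp only [List.length_append, List.length_cons, List.length_nil]
          push_cast
          ring
        · rw [if_neg hc, if_neg hc]
          by_cases hgt : (pvL s1 s2 i (k + 1)).length > (pvL s1 s2 (i + 1) k).length
          · rw [if_pos hgt]
            omega
          · rw [if_neg hgt]
            omega
  rw [hval]
  have hset := fun i' j' => pvGet2_pvSet2 t i k ((pvL s1 s2 i k).length : Int) i' j' hjr
  refine ⟨⟨?_, ?_, ?_⟩, ?_⟩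
  · simp [pvSet2, hlen]
  · intro r hr
    unfold pvSet2
    rw [getD_set]
    split_ifs with h1
    · obtain ⟨h1, -⟩ := h1
      subst h1
      rw [List.length_set]
      exact hrow r hr
    · exact hrow r hr
  · intro i' j' hi' hj'
    rw [hset i' j']
    rw [if_neg (by omega)]
    exact hcells i' j' hi' hj'
  · intro j' hj'
    rw [hset i j']
    by_cases h1 : j' = k
    · subst h1
      rw [if_pos ⟨rfl, rfl, by omega⟩]
    · rw [if_neg (by simp [h1])]
      exact hrowi j' (by omega)

theorem inner_fold (s1 s2 : List Char) (i : Nat) (hi : i ≤ s1.length) :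
    ∀ (k : Nat), k ≤ s2.length + 1 → ∀ t, InvRow s1 s2 i 0 t →
      InvRow s1 s2 i k ((List.range k).foldl (fun t j =>
        pvSet2 t i j
          (if i = 0 ∨ j = 0 then 0
           else if s1.getD (i - 1) ' ' = s2.getD (j - 1) ' ' then pvGet2 t (i - 1) (j - 1) + 1
           else max (pvGet2 t (i - 1) j) (pvGet2 t i (j - 1)))) t) := by
  intro k
  induction k with
  | zero => intro _ t h; simpa using h
  | succ k ih =>
    intro hk t h
    rw [List.range_succ, List.foldl_append, List.foldl_cons, List.foldl_nil]
    exact inner_step s1 s2 i k hi (by omega) _ (ih (by omega) t h)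

theorem fill_correct (s1 s2 : List Char) :
    ∀ i j, i ≤ s1.length → j ≤ s2.length →
      pvGet2 (pvFill s1 s2) i j = ((pvL s1 s2 i j).length : Int) := by
  have main : ∀ (i : Nat), i ≤ s1.length + 1 →
      InvRows s1 s2 i ((List.range i).foldl (fun t i =>
        (List.range (s2.length + 1)).foldl (fun t j =>
          pvSet2 t i j
            (if i = 0 ∨ j = 0 then 0
             else if s1.getD (i - 1) ' ' = s2.getD (j - 1) ' ' then pvGet2 t (i - 1) (j - 1) + 1
             else max (pvGet2 t (i - 1) j) (pvGet2 t i (j - 1)))) t)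
        ((List.range (s1.length + 1)).map (fun _ => (List.range (s2.length + 1)).map (fun _ => (0 : Int))))) := by
    intro i
    induction i with
    | zero =>
      intro _
      simp only [List.range_zero, List.foldl_nil]
      refine ⟨by simp, ?_, by intro i' j' h hj; exact absurd h (by omega)⟩
      intro r hr
      rw [PySem.List.getD_map_range _ _ _ _ hr]
      simp
    | succ i ih =>
      intro hi
      rw [show List.range (i + 1) = List.range i ++ [i] from List.range_succ,
        List.foldl_append, List.foldl_cons, List.foldl_nil]
      have h1 := inner_fold s1 s2 i (by omega) (s2.length + 1) le_rfl _ ⟨ih (by omega), by omega⟩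
      obtain ⟨⟨ha, hb, hc⟩, hd⟩ := h1
      refine ⟨ha, hb, ?_⟩
      intro i' j' hi' hj'
      by_cases h2 : i' = i
      · subst h2; exact hd j' hj'
      · exact hc i' j' (by omega) hj'
  intro i j hi hj
  have h := main (s1.length + 1) le_rfl
  exact h.2.2 i j (by omega) (by omega)

theorem trace_eq (s1 s2 : List Char) (t : List (List Int))
    (ht : ∀ i j, i ≤ s1.length → j ≤ s2.length → pvGet2 t i j = ((pvL s1 s2 i j).length : Int)) :
    ∀ (N i j : Nat) (best : List Char), i + j ≤ N → i ≤ s1.length → j ≤ s2.length →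
      pvTrace s1 s2 t i j best = pvL s1 s2 i j ++ best := by
  intro N
  induction N with
  | zero =>
    intro i j best hN hi hj
    have : i = 0 := by omega
    subst this
    rw [pvTrace.eq_def, pvL_zero_left]
    rfl
  | succ N ihN =>
    intro i j best hN hi hj
    match i, j with
    | 0, j => rw [pvTrace.eq_def, pvL_zero_left]; rfl
    | i + 1, 0 => rw [pvTrace.eq_def, pvL_zero_right]; rfl
    | i + 1, j + 1 =>
      rw [pvTrace.eq_def]
      simp only
      by_cases hc : s1.getD i ' ' = s2.getD j ' '
      · rw [if_pos hc, ihN i j _ (by omega) (by omega) (by omega), pvL_succ_succ, if_pos hc]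
        simp
      · rw [if_neg hc]
        rw [ht i (j + 1) (by omega) (by omega), ht (i + 1) j (by omega) (by omega)]
        rw [pvL_succ_succ, if_neg hc]
        by_cases hgt : (pvL s1 s2 i (j + 1)).length > (pvL s1 s2 (i + 1) j).length
        · rw [if_pos (by exact_mod_cast hgt), if_pos hgt,
            ihN i (j + 1) best (by omega) (by omega) (by omega)]
        · rw [if_neg (by exact_mod_cast hgt), if_neg hgt,
            ihN (i + 1) j best (by omega) (by omega) (by omega)]

theorem pvLcsA_eq_pvL (s1 s2 : List Char) : pvLcsA s1 s2 = pvL s1 s2 s1.length s2.length := by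
  unfold pvLcsA
  rw [trace_eq s1 s2 (pvFill s1 s2) (fill_correct s1 s2) (s1.length + s2.length)
    s1.length s2.length [] le_rfl le_rfl le_rfl]
  simp

theorem rowB_inner (s1 s2 : List Char) (i : Nat) :
    ∀ (tail : List Char) (q : Nat), tail = s2.drop q → q ≤ s2.length →
      (PySem.List.enumerate tail (q : Int)).foldl (fun cur p =>
        cur ++ [if s1.getD i ' ' = p.2 then PySem.List.pyGetD ((List.range (s2.length + 1)).map (fun j => pvL s1 s2 i j)) p.1 [] ++ [s1.getD i ' ']
                else if (PySem.List.pyGetD ((List.range (s2.length + 1)).map (fun j => pvL s1 s2 i j)) (p.1 + 1) []).length > (PySem.List.pyGetD cur p.1 []).length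
                then PySem.List.pyGetD ((List.range (s2.length + 1)).map (fun j => pvL s1 s2 i j)) (p.1 + 1) []
                else PySem.List.pyGetD cur p.1 []]) ((List.range (q + 1)).map (fun j => pvL s1 s2 (i + 1) j))
      = (List.range (s2.length + 1)).map (fun j => pvL s1 s2 (i + 1) j) := by
  intro tail
  induction tail with
  | nil =>
    intro q hq hqle
    have : q = s2.length := by
      have := congrArg List.length hq
      simp [List.length_drop] at this
      omega
    subst this
    simp [PySem.List.enumerate]
  | cons c2 rest ih =>
    intro q hq hqle
    have hqlt : q < s2.length := by
      have := congrArg List.length hq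
      simp [List.length_drop] at this
      omega
    have hc2 : c2 = s2.getD q ' ' := by
      have : s2.drop q = c2 :: rest := hq.symm
      have h := congrArg (fun l => l[0]?) hq
      simp only [List.getElem?_drop, Nat.add_zero] at h
      have h2 : s2[q]? = some c2 := by simpa using h.symm
      simp [List.getD, h2]
    have hrest : rest = s2.drop (q + 1) := by
      have : s2.drop q = c2 :: rest := hq.symm
      have := congrArg (List.drop 1) this
      simpa [List.drop_drop, Nat.add_comm] using this.symm
    rw [PySem.List.enumerate_cons, List.foldl_cons]
    have hgprev : PySem.List.pyGetD ((List.range (s2.length + 1)).map (fun j => pvL s1 s2 i j)) (q : Int) [] = pvL s1 s2 i q := by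
      rw [PySem.List.pyGetD_natCast, PySem.List.getD_map_range _ _ _ _ (by omega)]
    have hgprev1 : PySem.List.pyGetD ((List.range (s2.length + 1)).map (fun j => pvL s1 s2 i j)) ((q : Int) + 1) [] = pvL s1 s2 i (q + 1) := by
      have : ((q : Int) + 1) = ((q + 1 : Nat) : Int) := by push_cast; ring
      rw [this, PySem.List.pyGetD_natCast, PySem.List.getD_map_range _ _ _ _ (by omega)]
    have hgcur : PySem.List.pyGetD ((List.range (q + 1)).map (fun j => pvL s1 s2 (i + 1) j)) (q : Int) [] = pvL s1 s2 (i + 1) q := by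
      rw [PySem.List.pyGetD_natCast, PySem.List.getD_map_range _ _ _ _ (by omega)]
    rw [hgprev, hgprev1, hgcur]
    have hnew : ((List.range (q + 1)).map (fun j => pvL s1 s2 (i + 1) j)) ++
        [if s1.getD i ' ' = c2 then pvL s1 s2 i q ++ [s1.getD i ' ']
         else if (pvL s1 s2 i (q + 1)).length > (pvL s1 s2 (i + 1) q).length then pvL s1 s2 i (q + 1)
         else pvL s1 s2 (i + 1) q]
        = (List.range (q + 2)).map (fun j => pvL s1 s2 (i + 1) j) := by
      conv_rhs => rw [show q + 2 = (q + 1) + 1 from rfl, List.range_succ]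
      simp only [List.map_append, List.map_cons, List.map_nil]
      rw [pvL_succ_succ, ← hc2]
    rw [hnew]
    have := ih (q + 1) hrest (by omega)
    simpa using this

theorem lcsB_rows (s1 s2 : List Char) :
    ∀ k, k ≤ s1.length →
      (s1.take k).foldl (fun prev c1 => pvRowB s2 c1 prev) (List.replicate (s2.length + 1) [])
        = (List.range (s2.length + 1)).map (fun j => pvL s1 s2 k j) := by
  intro k
  induction k with
  | zero =>
    intro _
    simp [pvL_zero_left]
  | succ k ih =>
    intro hk
    have hklt : k < s1.length := by omega
    rw [List.take_add_one, List.foldl_append, ih (by omega)]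
    have hget : s1[k]? = some (s1.getD k ' ') := by
      simp [List.getD, List.getElem?_eq_getElem hklt]
    rw [hget]
    simp only [Option.toList_some, List.foldl_cons, List.foldl_nil]
    unfold pvRowB
    have h0 : ([[]] : List (List Char)) = (List.range (0 + 1)).map (fun j => pvL s1 s2 (k + 1) j) := by
      simp [pvL_zero_right]
    rw [h0]
    have := rowB_inner s1 s2 k s2 0 (by simp) (by omega)
    simpa using this

theorem pvLcsB_eq_pvL (s1 s2 : List Char) : pvLcsB s1 s2 = pvL s1 s2 s1.length s2.length := by
  unfold pvLcsB
  have h := lcsB_rows s1 s2 s1.length le_rfl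
  rw [List.take_length] at h
  rw [h]
  have hne : (List.map (fun j => pvL s1 s2 s1.length j) (List.range (s2.length + 1))) ≠ [] := by simp
  rw [PySem.List.pyGetD_neg_one _ _ hne]
  simp [List.getLast_eq_getElem]

theorem highlight_loop_eq (l extras : List Char) :
    (PySem.List.pyRange 0 (l.length : Int) 1).foldl (fun acc i =>
      if PySem.Chars.isIn [PySem.List.pyGetD l i ' '] extras then acc ++ [PySem.List.pyGetD l i ' ']
      else acc ++ ('[' :: '[' :: PySem.List.pyGetD l i ' ' :: [']', ']'])) []
    = (l.map (pvMark extras)).flatten := by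
  have h1 : (PySem.List.pyRange 0 (l.length : Int) 1).foldl (fun acc i =>
      if PySem.Chars.isIn [PySem.List.pyGetD l i ' '] extras then acc ++ [PySem.List.pyGetD l i ' ']
      else acc ++ ('[' :: '[' :: PySem.List.pyGetD l i ' ' :: [']', ']'])) []
      = (PySem.List.pyRange 0 (l.length : Int) 1).foldl (fun acc i =>
        acc ++ pvMark extras (PySem.List.pyGetD l i ' ')) [] := by
    apply PySem.List.foldl_congr_mem
    intro acc i _
    unfold pvMark
    split <;> rfl
  rw [h1]
  rw [PySem.List.foldl_pyRange_zero_pyGetD' l ' ' (fun acc c => acc ++ pvMark extras c) []]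
  rw [PySem.List.foldl_append_eq_flatMap]
  simp [List.flatMap_def]

-- ===== VERDICT (by name: the statement is the Claim_ definition above) =====
theorem highlight_line_spec : Claim_equal_highlight_line := by
  intro s1 s2 _
  unfold Spec_highlight_line highlight_line highlight_line_alt
  simp only [pvLcsA_eq_pvL, pvLcsB_eq_pvL, highlight_loop_eq]
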